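-- pv_equiv track=rewrite | github.com/54nt14g0/conjuntos_TLF | Conjuntos.py | diferenciaSimetricaTres
-- ===== SOURCE A (Python) =====
-- def diferenciaSimetricaTres(conjunto1, conjunto2, conjunto3):
--     """
--     Calcula la diferencia simétrica entre tres conjuntos usando ciclos.
--
--     Args:
--         conjunto1 (list): Primer conjunto como lista.
--         conjunto2 (list): Segundo conjunto como lista.
--         conjunto3 (list): Tercer conjunto como lista.
--
--     Returns:
--         set: La diferencia simétrica entre los tres conjuntos.
--     """
--     conjuntoFinal = set()
--     unionConjuntos = set(conjunto1 + conjunto2 + conjunto3)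
--
--     for item in unionConjuntos:
--         count = sum([item in conjunto1, item in conjunto2, item in conjunto3])
--         if count == 1:
--             conjuntoFinal.add(item)
--
--     return conjuntoFinal
-- ===== SOURCE B (Python) =====
-- def diferenciaSimetricaTres(conjunto1, conjunto2, conjunto3):
--     s1, s2, s3 = set(conjunto1), set(conjunto2), set(conjunto3)
--     return (s1 - s2 - s3) | (s2 - s1 - s3) | (s3 - s1 - s2)
-- ===== Notes on version B (the rewrite author's own statement) =====
-- stated objective: simpler
-- what changed: Replaced the union-building and per-element membership-counting loop with the set-algebra closed form (s1-s2-s3)|(s2-s1-s3)|(s3-s1-s2) on three sets.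
import Mathlib
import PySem

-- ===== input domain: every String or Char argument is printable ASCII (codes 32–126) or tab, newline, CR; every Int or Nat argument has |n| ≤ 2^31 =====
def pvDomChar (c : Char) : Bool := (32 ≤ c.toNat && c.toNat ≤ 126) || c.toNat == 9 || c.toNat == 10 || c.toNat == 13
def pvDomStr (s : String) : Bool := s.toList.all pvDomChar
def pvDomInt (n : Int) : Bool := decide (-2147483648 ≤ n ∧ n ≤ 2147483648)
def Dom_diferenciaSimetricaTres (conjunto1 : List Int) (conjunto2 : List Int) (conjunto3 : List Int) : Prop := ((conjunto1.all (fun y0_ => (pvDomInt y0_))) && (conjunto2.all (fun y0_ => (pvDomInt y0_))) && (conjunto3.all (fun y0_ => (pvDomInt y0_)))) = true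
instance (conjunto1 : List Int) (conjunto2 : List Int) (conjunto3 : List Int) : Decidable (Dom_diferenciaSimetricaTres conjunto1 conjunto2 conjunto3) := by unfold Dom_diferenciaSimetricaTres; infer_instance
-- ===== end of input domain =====

-- B replaces A's union-building and membership-counting loop by the set-algebra
-- closed form (s1-s2-s3) | (s2-s1-s3) | (s3-s1-s2): simpler, and it does set
-- membership tests instead of A's per-element list scans.


-- ===== PORT A =====
-- A builds the union as a set, then adds every element whose membership count over
-- the three input lists is exactly 1.
def diferenciaSimetricaTres (conjunto1 : List Int) (conjunto2 : List Int) (conjunto3 : List Int) : List Int :=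
  let unionConjuntos : PySem.Set Int := PySem.Set.ofList (conjunto1 ++ conjunto2 ++ conjunto3)
  unionConjuntos.foldl
    (fun conjuntoFinal item =>
      let count : Int :=
        [if conjunto1.contains item then (1:Int) else 0,
         if conjunto2.contains item then (1:Int) else 0,
         if conjunto3.contains item then (1:Int) else 0].sum
      if count == 1 then PySem.Set.add conjuntoFinal item else conjuntoFinal)
    PySem.Set.empty

-- ===== PORT B =====
def diferenciaSimetricaTres_alt (conjunto1 : List Int) (conjunto2 : List Int) (conjunto3 : List Int) : List Int :=
  let s1 : PySem.Set Int := PySem.Set.ofList conjunto1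
  let s2 : PySem.Set Int := PySem.Set.ofList conjunto2
  let s3 : PySem.Set Int := PySem.Set.ofList conjunto3
  PySem.Set.union
    (PySem.Set.union (PySem.Set.diff (PySem.Set.diff s1 s2) s3)
                     (PySem.Set.diff (PySem.Set.diff s2 s1) s3))
    (PySem.Set.diff (PySem.Set.diff s3 s1) s2)

-- ===== PRECONDITION & SPEC =====
def Spec_diferenciaSimetricaTres (conjunto1 : List Int) (conjunto2 : List Int) (conjunto3 : List Int) (out : List Int) : Prop := out = diferenciaSimetricaTres_alt conjunto1 conjunto2 conjunto3
instance (conjunto1 : List Int) (conjunto2 : List Int) (conjunto3 : List Int) (out : List Int) : Decidable (Spec_diferenciaSimetricaTres conjunto1 conjunto2 conjunto3 out) := by unfold Spec_diferenciaSimetricaTres; infer_instance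

-- ===== CLAIM (what is proved, stated in full; the proofs are below) =====
def Claim_equal_diferenciaSimetricaTres : Prop := ∀ (conjunto1 : List Int) (conjunto2 : List Int) (conjunto3 : List Int), Dom_diferenciaSimetricaTres conjunto1 conjunto2 conjunto3 → Spec_diferenciaSimetricaTres conjunto1 conjunto2 conjunto3 (diferenciaSimetricaTres conjunto1 conjunto2 conjunto3)

-- ===== LEMMAS AND PROOFS =====

-- first-occurrence dedup, a structural form of PySem.Set.ofList (proof-only helper)
def pvDD : List Int → List Int
  | [] => []
  | x :: xs => x :: pvDD (xs.filter (fun y => y ≠ x))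
termination_by l => l.length
decreasing_by
  calc (List.filter (fun x_1 => decide ((x_1 : {y // y ∈ xs}) ≠ x)) xs.attach).unattach.length
      ≤ xs.attach.length := by
        rw [List.length_unattach]; exact List.length_filter_le _ _
    _ = xs.length := List.length_attach
    _ < (x :: xs).length := by simp

theorem pvDD_cons (x : Int) (xs : List Int) :
    pvDD (x :: xs) = x :: pvDD (xs.filter (fun y => y ≠ x)) := by
  rw [pvDD]

-- foldl Set.add from s appends the first-occurrence dedup of the fresh elements
theorem pvFoldlAdd (l : List Int) (s : List Int) :
    l.foldl PySem.Set.add s = s ++ pvDD (l.filter (fun x => ¬ s.contains x)) := by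
  induction l generalizing s with
  | nil => simp [pvDD]
  | cons x xs ih =>
    by_cases hx : x ∈ s
    · rw [List.foldl_cons]
      have : PySem.Set.add s x = s := by simp [PySem.Set.add, hx]
      rw [this, ih, List.filter_cons]
      simp [hx]
    · have hadd : PySem.Set.add s x = s ++ [x] := by simp [PySem.Set.add, hx]
      rw [List.foldl_cons, hadd, ih]
      have hf : xs.filter (fun y => ¬ (s ++ [x]).contains y)
          = (xs.filter (fun y => ¬ s.contains y)).filter (fun y => y ≠ x) := by
        rw [List.filter_filter]
        apply List.filter_congr
        intro y _
        by_cases h1 : y ∈ s <;> by_cases h2 : y = x <;> simp [h1, h2]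
      rw [hf, List.filter_cons]
      rw [if_pos (by simp [hx]), pvDD_cons]
      simp

theorem pvOfList_eq_dd (l : List Int) : PySem.Set.ofList l = pvDD l := by
  have := pvFoldlAdd l []
  simpa [PySem.Set.ofList, PySem.Set.empty] using this

-- first-occurrence dedup commutes with filter
theorem pvDD_filter (Q : Int → Bool) (l : List Int) :
    pvDD (l.filter Q) = (pvDD l).filter Q := by
  induction hn : l.length using Nat.strong_induction_on generalizing l with
  | _ n ih =>
    match l with
    | [] => simp [pvDD]
    | x :: xs =>
      rw [pvDD_cons, List.filter_cons]
      have hlt : (xs.filter (fun y => y ≠ x)).length < n := by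
        have := List.length_filter_le (fun y => decide (y ≠ x)) xs
        simp at hn; omega
      by_cases hq : Q x
      · rw [if_pos (by simp [hq]), pvDD_cons, List.filter_cons, if_pos (by simp [hq])]
        rw [List.filter_comm]
        rw [ih _ hlt _ rfl]
      · rw [if_neg (by simp [hq]), List.filter_cons, if_neg (by simp [hq])]
        rw [← ih _ hlt _ rfl]
        congr 1
        rw [List.filter_filter]
        apply List.filter_congr
        intro y _
        by_cases h2 : y = x
        · simp [h2, hq]
        · simp [h2]

-- A's guarded-add loop over a duplicate-free list is a filter
theorem pvLoopA (P : Int → Bool) (l acc : List Int)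
    (hn : l.Nodup) (h : ∀ x ∈ l, x ∉ acc) :
    l.foldl (fun a x => if P x then PySem.Set.add a x else a) acc
    = acc ++ l.filter P := by
  induction l generalizing acc with
  | nil => simp
  | cons x xs ih =>
    rw [List.foldl_cons, List.filter_cons]
    by_cases hp : P x
    · rw [if_pos hp, if_pos hp]
      have hadd : PySem.Set.add acc x = acc ++ [x] := by
        simp [PySem.Set.add, h x (by simp)]
      have hsub : ∀ y ∈ xs, y ∉ acc ++ [x] := by
        intro y hy
        simp only [List.mem_append, List.mem_singleton]
        push_neg
        exact ⟨h y (by simp [hy]), fun hyx => (List.nodup_cons.mp hn).1 (hyx ▸ hy)⟩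
      rw [hadd, ih (acc ++ [x]) hn.of_cons hsub]
      simp
    · rw [if_neg hp, if_neg hp]
      exact ih acc hn.of_cons (fun y hy => h y (by simp [hy]))

theorem pvDD_append (a b : List Int) :
    pvDD (a ++ b) = pvDD a ++ pvDD (b.filter (fun x => ¬ a.contains x)) := by
  rw [← pvOfList_eq_dd, ← pvOfList_eq_dd]
  show List.foldl PySem.Set.add PySem.Set.empty (a ++ b) = _
  rw [List.foldl_append]
  show List.foldl PySem.Set.add (PySem.Set.ofList a) b = _
  rw [pvFoldlAdd]
  congr 2
  apply List.filter_congr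
  intro y _
  simp [PySem.Set.mem_ofList]

theorem pvDD_filter_ofList (q : Int → Bool) (c : List Int) :
    pvDD ((PySem.Set.ofList c).filter q) = (PySem.Set.ofList c).filter q := by
  rw [pvDD_filter, ← pvOfList_eq_dd, PySem.Set.ofList_ofList]

-- union with a duplicate-free set disjoint from the left operand is append
theorem pvUnion_disj (s t : List Int) (hd : pvDD t = t) (h : ∀ x ∈ t, x ∉ s) :
    PySem.Set.union s t = s ++ t := by
  show List.foldl PySem.Set.add s t = _
  rw [pvFoldlAdd]
  congr 1
  rw [List.filter_eq_self.mpr (by intro x hx; simp [List.contains_iff_mem, h x hx]), hd]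

theorem pvMain (c1 c2 c3 : List Int) :
    diferenciaSimetricaTres c1 c2 c3 = diferenciaSimetricaTres_alt c1 c2 c3 := by
  -- A as a filter of the deduplicated concatenation
  have hA : diferenciaSimetricaTres c1 c2 c3
      = ((PySem.Set.ofList (c1 ++ c2 ++ c3)).filter
          (fun item => ([if c1.contains item then (1:Int) else 0,
                         if c2.contains item then (1:Int) else 0,
                         if c3.contains item then (1:Int) else 0].sum == 1))) :=
    (pvLoopA _ _ PySem.Set.empty (PySem.Set.nodup_ofList _)
      (by intro x _ hx; simp [PySem.Set.empty] at hx)).trans (List.nil_append _)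
  rw [hA, pvOfList_eq_dd, pvDD_append, pvDD_append, List.filter_append, List.filter_append]
  -- the three segments of A
  have h1 : (pvDD c1).filter
        (fun item => ([if c1.contains item then (1:Int) else 0,
                       if c2.contains item then (1:Int) else 0,
                       if c3.contains item then (1:Int) else 0].sum == 1))
      = (PySem.Set.ofList c1).filter (fun x => !c2.contains x && !c3.contains x) := by
    rw [← pvOfList_eq_dd]
    apply List.filter_congr
    intro x hx
    rw [PySem.Set.mem_ofList] at hx
    by_cases h2 : x ∈ c2 <;> by_cases h3 : x ∈ c3 <;>
      simp [List.contains_iff_mem, hx, h2, h3]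
  have h2 : (pvDD (c2.filter (fun x => ¬ c1.contains x))).filter
        (fun item => ([if c1.contains item then (1:Int) else 0,
                       if c2.contains item then (1:Int) else 0,
                       if c3.contains item then (1:Int) else 0].sum == 1))
      = (PySem.Set.ofList c2).filter (fun x => !c1.contains x && !c3.contains x) := by
    rw [pvDD_filter, ← pvOfList_eq_dd, List.filter_filter]
    apply List.filter_congr
    intro x hx
    rw [PySem.Set.mem_ofList] at hx
    by_cases ha : x ∈ c1 <;> by_cases h3 : x ∈ c3 <;>
      simp [List.contains_iff_mem, hx, ha, h3]
  have h3 : (pvDD (c3.filter (fun x => ¬ (c1 ++ c2).contains x))).filter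
        (fun item => ([if c1.contains item then (1:Int) else 0,
                       if c2.contains item then (1:Int) else 0,
                       if c3.contains item then (1:Int) else 0].sum == 1))
      = (PySem.Set.ofList c3).filter (fun x => !c1.contains x && !c2.contains x) := by
    rw [pvDD_filter, ← pvOfList_eq_dd, List.filter_filter]
    apply List.filter_congr
    intro x hx
    rw [PySem.Set.mem_ofList] at hx
    by_cases ha : x ∈ c1 <;> by_cases hb : x ∈ c2 <;>
      simp [List.contains_iff_mem, hx, ha, hb]
  rw [h1, h2, h3]
  -- B's diff-of-diff terms as single filters
  have hd1 : PySem.Set.diff (PySem.Set.diff (PySem.Set.ofList c1) (PySem.Set.ofList c2)) (PySem.Set.ofList c3)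
      = (PySem.Set.ofList c1).filter (fun x => !c2.contains x && !c3.contains x) := by
    show List.filter _ (List.filter _ _) = _
    rw [List.filter_filter]
    apply List.filter_congr
    intro x _
    by_cases hu : x ∈ c2 <;> by_cases hv : x ∈ c3 <;>
      simp [PySem.Set.contains, PySem.Set.mem_ofList, List.contains_iff_mem, hu, hv]
  have hd2 : PySem.Set.diff (PySem.Set.diff (PySem.Set.ofList c2) (PySem.Set.ofList c1)) (PySem.Set.ofList c3)
      = (PySem.Set.ofList c2).filter (fun x => !c1.contains x && !c3.contains x) := by
    show List.filter _ (List.filter _ _) = _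
    rw [List.filter_filter]
    apply List.filter_congr
    intro x _
    by_cases hu : x ∈ c1 <;> by_cases hv : x ∈ c3 <;>
      simp [PySem.Set.contains, PySem.Set.mem_ofList, List.contains_iff_mem, hu, hv]
  have hd3 : PySem.Set.diff (PySem.Set.diff (PySem.Set.ofList c3) (PySem.Set.ofList c1)) (PySem.Set.ofList c2)
      = (PySem.Set.ofList c3).filter (fun x => !c1.contains x && !c2.contains x) := by
    show List.filter _ (List.filter _ _) = _
    rw [List.filter_filter]
    apply List.filter_congr
    intro x _
    by_cases hu : x ∈ c1 <;> by_cases hv : x ∈ c2 <;>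
      simp [PySem.Set.contains, PySem.Set.mem_ofList, List.contains_iff_mem, hu, hv]
  show _ = PySem.Set.union (PySem.Set.union _ _) _
  rw [hd1, hd2, hd3]
  -- the three segments are pairwise disjoint, so the unions are appends
  have hu12 : PySem.Set.union
        ((PySem.Set.ofList c1).filter (fun x => !c2.contains x && !c3.contains x))
        ((PySem.Set.ofList c2).filter (fun x => !c1.contains x && !c3.contains x))
      = (PySem.Set.ofList c1).filter (fun x => !c2.contains x && !c3.contains x)
        ++ (PySem.Set.ofList c2).filter (fun x => !c1.contains x && !c3.contains x) := by
    apply pvUnion_disj _ _ (pvDD_filter_ofList _ _)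
    intro x hx hmem
    rw [List.mem_filter, PySem.Set.mem_ofList] at hx hmem
    have := hx.2
    simp [List.contains_iff_mem, hmem.1] at this
  rw [hu12]
  have hu3 : PySem.Set.union
        ((PySem.Set.ofList c1).filter (fun x => !c2.contains x && !c3.contains x)
          ++ (PySem.Set.ofList c2).filter (fun x => !c1.contains x && !c3.contains x))
        ((PySem.Set.ofList c3).filter (fun x => !c1.contains x && !c2.contains x))
      = ((PySem.Set.ofList c1).filter (fun x => !c2.contains x && !c3.contains x)
          ++ (PySem.Set.ofList c2).filter (fun x => !c1.contains x && !c3.contains x))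
        ++ (PySem.Set.ofList c3).filter (fun x => !c1.contains x && !c2.contains x) := by
    apply pvUnion_disj _ _ (pvDD_filter_ofList _ _)
    intro x hx hmem
    rw [List.mem_filter, PySem.Set.mem_ofList] at hx
    rcases List.mem_append.mp hmem with hm | hm <;>
      rw [List.mem_filter, PySem.Set.mem_ofList] at hm
    · have := hx.2
      simp [List.contains_iff_mem, hm.1] at this
    · have := hx.2
      simp [List.contains_iff_mem, hm.1] at this
  rw [hu3]

-- ===== VERDICT (by name: the statement is the Claim_ definition above) =====
theorem diferenciaSimetricaTres_spec : Claim_equal_diferenciaSimetricaTres := by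
  intro c1 c2 c3 _
  exact pvMain c1 c2 c3
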